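-- pv_equiv track=rewrite | github.com/harry-cramp/Subtitles-ReSync | resync.py | match_timestamp
-- ===== SOURCE A (Python) =====
-- numbers = { '0', '1', '2', '3', '4', '5', '6', '7', '8', '9' }
--
-- def match_timestamp(line):
--     # temporary template detection while regex is being designed
--     template = "XX:XX:XX,XXX --> XX:XX:XX,XXX"
--     if len(line) != len(template):
--         return False
--     index = 0
--     for char in template:
--         if char == "X":
--             if line[index] not in numbers:
--                 return False
--         else:
--             if line[index] != char:
--                 return False
--         index = index + 1
--     return True
-- ===== SOURCE B (Python) =====
-- import re
--
-- _TS = re.compile(r"[0-9]{2}:[0-9]{2}:[0-9]{2},[0-9]{3} --> [0-9]{2}:[0-9]{2}:[0-9]{2},[0-9]{3}")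
--
-- def match_timestamp(line):
--     return _TS.fullmatch(line) is not None
-- ===== Notes on version B (the rewrite author's own statement) =====
-- stated objective: idiomatic
-- what changed: Replaces the per-character template loop with a length check by a single precompiled re.fullmatch of the pattern [0-9]{2}:[0-9]{2}:[0-9]{2},[0-9]{3} --> [0-9]{2}:[0-9]{2}:[0-9]{2},[0-9]{3}
import Mathlib
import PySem

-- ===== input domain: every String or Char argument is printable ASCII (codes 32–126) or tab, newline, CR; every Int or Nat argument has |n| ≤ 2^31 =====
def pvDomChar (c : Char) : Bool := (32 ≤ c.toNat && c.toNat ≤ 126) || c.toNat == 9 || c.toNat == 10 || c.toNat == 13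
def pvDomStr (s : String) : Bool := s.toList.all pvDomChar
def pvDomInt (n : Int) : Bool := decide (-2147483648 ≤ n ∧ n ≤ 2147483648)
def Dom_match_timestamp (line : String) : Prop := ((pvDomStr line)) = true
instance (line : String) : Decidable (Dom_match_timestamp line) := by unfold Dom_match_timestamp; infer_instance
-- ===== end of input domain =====

-- B replaces A's per-character template loop (with separate length check) by a single
-- regex fullmatch of [0-9]{2}:[0-9]{2}:[0-9]{2},[0-9]{3} --> [0-9]{2}:[0-9]{2}:[0-9]{2},[0-9]{3};
-- objective: idiomatic (same O(n) cost).


-- ===== PORT A =====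
-- module-level 'numbers' set (set of the ten digit characters)
def pvNumbers : PySem.Set Char :=
  PySem.Set.ofList ['0', '1', '2', '3', '4', '5', '6', '7', '8', '9']

-- the 'for char in template' loop: recursion over the remaining template chars,
-- carrying the running index into line; early 'return False' = result false.
-- line[index] is always in range here (the length check ran), so the none branch is a totality guard.
def mtLoop (line : List Char) : List Char → Int → Bool
  | [], _ => true
  | t :: ts, index =>
    match PySem.List.pyGet? line index with
    | none => false
    | some c =>
      if t = 'X' then
        if c ∉ pvNumbers then false
        else mtLoop line ts (index + 1)
      else
        if c ≠ t then false
        else mtLoop line ts (index + 1)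

def match_timestamp (line : String) : Bool :=
  let template := "XX:XX:XX,XXX --> XX:XX:XX,XXX"
  if PySem.Str.len line ≠ PySem.Str.len template then false
  else mtLoop line.toList template.toList 0

-- ===== PORT B =====
-- the regex is a plain sequence of single-character atoms: [0-9] (ASCII digit) or a literal;
-- fullmatch = the token list and the string are consumed in lockstep, both to the end.
inductive RegTok where
  | digit : RegTok
  | lit : Char → RegTok
deriving DecidableEq, Repr

-- [0-9]{2}:[0-9]{2}:[0-9]{2},[0-9]{3}
def hmsToks : List RegTok :=
  [.digit, .digit, .lit ':', .digit, .digit, .lit ':', .digit, .digit, .lit ',',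
   .digit, .digit, .digit]

-- full pattern: hms " --> " hms
def tsToks : List RegTok :=
  hmsToks ++ [.lit ' ', .lit '-', .lit '-', .lit '>', .lit ' '] ++ hmsToks

def tokMatch : List RegTok → List Char → Bool
  | [], [] => true
  | .digit :: ts, c :: cs => if '0' ≤ c ∧ c ≤ '9' then tokMatch ts cs else false
  | .lit x :: ts, c :: cs => if c = x then tokMatch ts cs else false
  | _, _ => false

def match_timestamp_alt (line : String) : Bool :=
  tokMatch tsToks line.toList

-- ===== PRECONDITION & SPEC =====
def Spec_match_timestamp (line : String) (out : Bool) : Prop := out = match_timestamp_alt line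
instance (line : String) (out : Bool) : Decidable (Spec_match_timestamp line out) := by unfold Spec_match_timestamp; infer_instance

-- ===== CLAIM (what is proved, stated in full; the proofs are below) =====
def Claim_equal_match_timestamp : Prop := ∀ (line : String), Dom_match_timestamp line → Spec_match_timestamp line (match_timestamp line)

-- ===== LEMMAS AND PROOFS =====

-- the template char corresponding to each token
def tokOfTemplate (c : Char) : RegTok := if c = 'X' then .digit else .lit c

lemma tsToks_eq_map :
    tsToks = ("XX:XX:XX,XXX --> XX:XX:XX,XXX".toList).map tokOfTemplate := by
  decide

lemma digit_mem_iff (c : Char) :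
    c ∈ pvNumbers ↔ ('0' ≤ c ∧ c ≤ '9') := by
  rw [show pvNumbers = ['0','1','2','3','4','5','6','7','8','9'] from by decide]
  constructor
  · intro h
    simp only [List.mem_cons, List.not_mem_nil, or_false] at h
    rcases h with rfl | rfl | rfl | rfl | rfl | rfl | rfl | rfl | rfl | rfl <;>
      exact ⟨by decide, by decide⟩
  · rintro ⟨h1, h2⟩
    have hn1 : 48 ≤ c.toNat := UInt32.le_iff_toNat_le.mp h1
    have hn2 : c.toNat ≤ 57 := UInt32.le_iff_toNat_le.mp h2
    have hofn : Char.ofNat c.toNat = c := Char.ofNat_toNat c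
    have : c.toNat = 48 ∨ c.toNat = 49 ∨ c.toNat = 50 ∨ c.toNat = 51 ∨
        c.toNat = 52 ∨ c.toNat = 53 ∨ c.toNat = 54 ∨ c.toNat = 55 ∨
        c.toNat = 56 ∨ c.toNat = 57 := by omega
    rcases this with h | h | h | h | h | h | h | h | h | h <;>
      rw [← hofn, h] <;> decide

-- if the lengths disagree, tokMatch is false
lemma tokMatch_ne_length : ∀ (ts : List RegTok) (cs : List Char),
    ts.length ≠ cs.length → tokMatch ts cs = false := by
  intro ts
  induction ts with
  | nil => intro cs h; cases cs with
    | nil => simp at h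
    | cons c cs => rfl
  | cons t ts ih =>
    intro cs h
    cases cs with
    | nil => cases t <;> rfl
    | cons c cs =>
      cases t with
      | digit =>
        simp only [tokMatch]
        split
        · exact ih cs (by simpa using h)
        · rfl
      | lit x =>
        simp only [tokMatch]
        split
        · exact ih cs (by simpa using h)
        · rfl

-- main loop invariant: the A loop from index |pre| over template tail 'tmpl' equals
-- the lockstep token match on the remaining suffix, when the lengths line up.
lemma mtLoop_eq_tokMatch : ∀ (tmpl suf pre : List Char),
    tmpl.length = suf.length →
    mtLoop (pre ++ suf) tmpl (pre.length : Int) = tokMatch (tmpl.map tokOfTemplate) suf := by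
  intro tmpl
  induction tmpl with
  | nil =>
    intro suf pre h
    cases suf with
    | nil => rfl
    | cons c cs => simp at h
  | cons t ts ih =>
    intro suf pre h
    cases suf with
    | nil => simp at h
    | cons c cs =>
      have hget : PySem.List.pyGet? (pre ++ c :: cs) (pre.length : Int) = some c :=
        PySem.List.pyGet?_append_length pre cs c
      have hnext : mtLoop (pre ++ c :: cs) ts ((pre.length : Int) + 1)
          = tokMatch (ts.map tokOfTemplate) cs := by
        have := ih cs (pre ++ [c]) (by simpa using h)
        simpa [List.append_assoc] using this
      by_cases hx : t = 'X'
      · subst hx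
        simp only [mtLoop, hget, List.map, tokOfTemplate]
        by_cases hd : ('0' ≤ c ∧ c ≤ '9')
        · have hm : c ∈ pvNumbers := (digit_mem_iff c).mpr hd
          simp [tokMatch, hm, hd, hnext]
        · have hm : c ∉ pvNumbers := fun hmem => hd ((digit_mem_iff c).mp hmem)
          simp [tokMatch, hm, hd]
      · simp only [mtLoop, hget, List.map, tokOfTemplate, if_neg hx]
        by_cases hc : c = t
        · subst hc
          simp [tokMatch, hnext]
        · simp [tokMatch, hc]

-- ===== VERDICT (by name: the statement is the Claim_ definition above) =====
theorem match_timestamp_spec : Claim_equal_match_timestamp := by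
  intro line _
  show (if PySem.Str.len line ≠ PySem.Str.len "XX:XX:XX,XXX --> XX:XX:XX,XXX" then false
        else mtLoop line.toList ("XX:XX:XX,XXX --> XX:XX:XX,XXX").toList 0)
      = tokMatch tsToks line.toList
  rw [tsToks_eq_map]
  by_cases h : line.toList.length = ("XX:XX:XX,XXX --> XX:XX:XX,XXX").toList.length
  · rw [if_neg (by simp only [PySem.Str.len_eq, ne_eq, Nat.cast_inj, not_not]; exact h)]
    have := mtLoop_eq_tokMatch ("XX:XX:XX,XXX --> XX:XX:XX,XXX").toList line.toList [] h.symm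
    simpa using this
  · rw [if_pos (by simp only [PySem.Str.len_eq, ne_eq, Nat.cast_inj]; exact h)]
    have hlen : (("XX:XX:XX,XXX --> XX:XX:XX,XXX").toList.map tokOfTemplate).length ≠ line.toList.length := by
      simpa using fun hc => h hc.symm
    exact (tokMatch_ne_length _ _ hlen).symm
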